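-- pv_equiv track=rewrite | github.com/JaimeNevado/Docencia-Clases-Particulares | ClasesNacho/Clase4/ej3.py | asignar_grupos
-- ===== SOURCE A (Python) =====
-- def asignar_grupos(lista_nombres):
--     grupo_a = []
--     grupo_b = []
--     grupo_c = []
--
--     for i, nombre in enumerate(lista_nombres):
--         if i % 3 == 0:
--             grupo_a.append(nombre)
--         elif i % 3 == 1:
--             grupo_b.append(nombre)
--         else:
--             grupo_c.append(nombre)
--
--     return grupo_a, grupo_b, grupo_c
-- ===== SOURCE B (Python) =====
-- def asignar_grupos(lista_nombres):
--     return lista_nombres[0::3], lista_nombres[1::3], lista_nombres[2::3]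
-- ===== Notes on version B (the rewrite author's own statement) =====
-- stated objective: idiomatic
-- what changed: Replaces the single enumerate loop with mod-3 branching and per-element appends by three extended slices with step 3 (lista_nombres[k::3]), eliminating the index counter and all conditionals.
import Mathlib
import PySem

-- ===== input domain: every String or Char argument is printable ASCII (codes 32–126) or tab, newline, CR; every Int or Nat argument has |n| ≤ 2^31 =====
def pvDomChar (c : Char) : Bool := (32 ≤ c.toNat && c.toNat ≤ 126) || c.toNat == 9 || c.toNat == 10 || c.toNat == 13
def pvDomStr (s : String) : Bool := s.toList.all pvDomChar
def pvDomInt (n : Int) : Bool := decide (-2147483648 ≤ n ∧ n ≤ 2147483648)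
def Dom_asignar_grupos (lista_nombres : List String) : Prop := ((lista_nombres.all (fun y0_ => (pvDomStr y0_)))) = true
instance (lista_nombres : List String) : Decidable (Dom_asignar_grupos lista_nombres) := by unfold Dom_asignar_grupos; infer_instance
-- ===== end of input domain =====

-- B replaces A's enumerate loop with mod-3 branches by three extended slices [k::3]; objective: idiomatic.


-- ===== PORT A =====
def asignar_grupos (lista_nombres : List String) : List String × List String × List String :=
  (PySem.List.enumerate lista_nombres 0).foldl
    (fun (acc : List String × List String × List String) p =>
      let ga := acc.1
      let gb := acc.2.1
      let gc := acc.2.2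
      if PySem.Int.mod p.1 3 == 0 then (ga ++ [p.2], gb, gc)
      else if PySem.Int.mod p.1 3 == 1 then (ga, gb ++ [p.2], gc)
      else (ga, gb, gc ++ [p.2]))
    ([], [], [])

-- ===== PORT B =====
-- lista_nombres[k::3]; step 3 ≠ 0, so slice? is always some and getD [] never fires.
def asignar_grupos_alt (lista_nombres : List String) : List String × List String × List String :=
  ((PySem.List.slice? lista_nombres (some 0) none 3).getD [],
   (PySem.List.slice? lista_nombres (some 1) none 3).getD [],
   (PySem.List.slice? lista_nombres (some 2) none 3).getD [])

-- ===== PRECONDITION & SPEC =====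
def Spec_asignar_grupos (lista_nombres : List String) (out : List String × List String × List String) : Prop := out = asignar_grupos_alt lista_nombres
instance (lista_nombres : List String) (out : List String × List String × List String) : Decidable (Spec_asignar_grupos lista_nombres out) := by unfold Spec_asignar_grupos; infer_instance

-- ===== CLAIM (what is proved, stated in full; the proofs are below) =====
def Claim_equal_asignar_grupos : Prop := ∀ (lista_nombres : List String), Dom_asignar_grupos lista_nombres → Spec_asignar_grupos lista_nombres (asignar_grupos lista_nombres)

-- ===== LEMMAS AND PROOFS =====

-- every third element, starting with the head
def strided3 {α : Type} : List α → List α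
  | [] => []
  | x :: r => x :: strided3 (r.drop 2)
termination_by xs => xs.length
decreasing_by simp

theorem gather_eq_strided3 {α : Type} (m : Nat) : ∀ (xs : List α) (k : Nat),
    xs.length - k ≤ m →
    List.filterMap (fun j => xs[(k + 3 * j)]?) (List.range ((xs.length - k + 2) / 3))
      = strided3 (xs.drop k) := by
  induction m with
  | zero =>
    intro xs k h
    have hk : xs.length ≤ k := by omega
    rw [show (xs.length - k + 2) / 3 = 0 by omega]
    simp [List.drop_eq_nil_of_le hk, strided3]
  | succ m ih =>
    intro xs k h
    by_cases hk : xs.length ≤ k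
    · rw [show (xs.length - k + 2) / 3 = 0 by omega]
      simp [List.drop_eq_nil_of_le hk, strided3]
    · have hlt : k < xs.length := by omega
      have hc : (xs.length - k + 2) / 3 = (xs.length - (k + 3) + 2) / 3 + 1 := by omega
      rw [hc, List.range_succ_eq_map, List.filterMap_cons, List.filterMap_map]
      have hx : xs[(k + 3 * 0)]? = some xs[k] := by
        simp [List.getElem?_eq_getElem hlt]
      rw [hx]
      have hfun : ((fun j => xs[(k + 3 * j)]?) ∘ (· + 1)) = (fun j => xs[((k + 3) + 3 * j)]?) := by
        funext j; simp only [Function.comp]; congr 1; ring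
      rw [hfun, ih xs (k + 3) (by omega)]
      rw [List.drop_eq_getElem_cons hlt, strided3]
      simp [List.drop_drop]

theorem slice3_eq_strided3 {α : Type} (xs : List α) (k : Nat) :
    (PySem.List.slice? xs (some (k : Int)) none 3).getD [] = strided3 (xs.drop k) := by
  have hmain := gather_eq_strided3 (xs.length - k) xs k le_rfl
  have hk0 : ¬((k : Int) < 0) := by omega
  by_cases hk : xs.length ≤ k
  · rw [List.drop_eq_nil_of_le hk]
    simp only [PySem.List.slice?, PySem.List.sliceIndices]
    norm_num
    simp only [hk0, if_false]
    rw [min_eq_right (show (xs.length : Int) ≤ (k : Int) by omega)]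
    rw [if_neg (lt_irrefl ((xs.length : Int)))]
    simp [strided3]
  · have hlt : k < xs.length := by omega
    simp only [PySem.List.slice?, PySem.List.sliceIndices]
    norm_num
    simp only [hk0, if_false]
    rw [min_eq_left (show (k : Int) ≤ (xs.length : Int) by omega)]
    rw [if_pos (show (k : Int) < (xs.length : Int) by omega)]
    rw [show (((xs.length : Int) - k + 3 - 1) / 3).toNat = (xs.length - k + 2) / 3 by omega]
    rw [← hmain]
    apply List.filterMap_congr
    intro j _
    congr 1

theorem fold_inv (n : Nat) : ∀ (xs : List String), xs.length ≤ n →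
    ∀ (s : Nat) (ga gb gc : List String),
    (PySem.List.enumerate xs (3 * (s : Int))).foldl
      (fun (acc : List String × List String × List String) p =>
        let ga := acc.1
        let gb := acc.2.1
        let gc := acc.2.2
        if PySem.Int.mod p.1 3 == 0 then (ga ++ [p.2], gb, gc)
        else if PySem.Int.mod p.1 3 == 1 then (ga, gb ++ [p.2], gc)
        else (ga, gb, gc ++ [p.2]))
      (ga, gb, gc)
    = (ga ++ strided3 xs, gb ++ strided3 (xs.drop 1), gc ++ strided3 (xs.drop 2)) := by
  induction n with
  | zero =>
    intro xs h s ga gb gc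
    have : xs = [] := List.eq_nil_of_length_eq_zero (Nat.le_zero.mp h)
    subst this
    simp [PySem.List.enumerate, strided3]
  | succ n ih =>
    intro xs h s ga gb gc
    have h0 : PySem.Int.mod (3 * (s : Int)) 3 = 0 := by
      rw [PySem.Int.mod_eq_emod_of_pos (by norm_num : (0:Int) < 3)]; omega
    have h1 : PySem.Int.mod (3 * (s : Int) + 1) 3 = 1 := by
      rw [PySem.Int.mod_eq_emod_of_pos (by norm_num : (0:Int) < 3)]; omega
    have h2 : PySem.Int.mod (3 * (s : Int) + 1 + 1) 3 = 2 := by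
      rw [PySem.Int.mod_eq_emod_of_pos (by norm_num : (0:Int) < 3)]; omega
    match xs with
    | [] => simp [PySem.List.enumerate, strided3]
    | [x] =>
      simp [PySem.List.enumerate_cons, PySem.List.enumerate_nil, strided3]
    | [x, y] =>
      simp [PySem.List.enumerate_cons, PySem.List.enumerate_nil, strided3]
    | x :: y :: z :: rest =>
      have hrest : rest.length ≤ n := by simp at h; omega
      have hstep : (3 : Int) * (s : Int) + 1 + 1 + 1 = 3 * ((s + 1 : Nat) : Int) := by
        push_cast; ring
      simp only [PySem.List.enumerate_cons, List.foldl_cons, h0, h1, h2,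
        Int.reduceBEq, Bool.false_eq_true, if_true, if_false]
      rw [hstep, ih rest hrest (s + 1) (ga ++ [x]) (gb ++ [y]) (gc ++ [z])]
      simp [strided3, List.append_assoc]

-- ===== VERDICT (by name: the statement is the Claim_ definition above) =====
theorem asignar_grupos_spec : Claim_equal_asignar_grupos := by
  intro xs _
  unfold Spec_asignar_grupos asignar_grupos asignar_grupos_alt
  have h := fold_inv xs.length xs le_rfl 0 [] [] []
  simp only [Nat.cast_zero, mul_zero] at h
  rw [h]
  have h0 := slice3_eq_strided3 xs 0
  have h1 := slice3_eq_strided3 xs 1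
  have h2 := slice3_eq_strided3 xs 2
  push_cast at h0 h1 h2
  simp only [Prod.mk.injEq, List.nil_append]
  refine ⟨h0.symm, ?_, h2.symm⟩
  exact h1.symm
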